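-- pv_equiv track=rewrite | github.com/solaegis/pre-commit-glassworm | src/glassworm/scanner.py | _is_dangerous
-- ===== SOURCE A (Python) =====
-- import unicodedata
--
-- _DANGEROUS_RANGES: list[tuple[int, int, str]] = [
--     # Variation Selectors — GlassWorm primary technique
--     (0xFE00, 0xFE0F, "variation selector (GlassWorm)"),
--     # Variation Selectors Supplement
--     (0xE0100, 0xE01EF, "variation selector supplement (GlassWorm)"),
--     # Bidi control — Trojan Source CVE-2021-42574
--     (0x202A, 0x202E, "bidi control (Trojan Source CVE-2021-42574)"),
--     (0x2066, 0x2069, "bidi control (Trojan Source CVE-2021-42574)"),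
--     # Zero-width and invisible
--     (0x200B, 0x200F, "zero-width/invisible"),
--     (0x2060, 0x2064, "zero-width/invisible"),
-- ]
--
-- _DANGEROUS_SINGLES: dict[int, str] = {
--     0x180E: "Mongolian vowel separator (Cf)",
--     0xFEFF: "BOM mid-file",
--     0xFFFD: "replacement character (unsafe decoding)",
-- }
--
-- def _is_dangerous(codepoint: int) -> tuple[bool, str]:
--     """Check if a Unicode codepoint is dangerous.
--
--     Returns ``(is_dangerous, reason)``.
--     """
--     for start, end, reason in _DANGEROUS_RANGES:
--         if start <= codepoint <= end:
--             return True, reason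
--
--     if codepoint in _DANGEROUS_SINGLES:
--         return True, _DANGEROUS_SINGLES[codepoint]
--
--     # Cf = Format characters (invisible) — catch-all
--     if unicodedata.category(chr(codepoint)) == "Cf":
--         return True, "format character (Cf)"
--
--     return False, ""
-- ===== SOURCE B (Python) =====
-- import unicodedata
--
-- # All dangerous codepoints as disjoint, sorted-by-start closed intervals:
-- # the six ranges of _DANGEROUS_RANGES plus the three singles as one-point
-- # intervals (they do not overlap any range, so precedence is irrelevant).
-- _INTERVALS: list[tuple[int, int, str]] = [
--     (0x180E, 0x180E, "Mongolian vowel separator (Cf)"),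
--     (0x200B, 0x200F, "zero-width/invisible"),
--     (0x202A, 0x202E, "bidi control (Trojan Source CVE-2021-42574)"),
--     (0x2060, 0x2064, "zero-width/invisible"),
--     (0x2066, 0x2069, "bidi control (Trojan Source CVE-2021-42574)"),
--     (0xFE00, 0xFE0F, "variation selector (GlassWorm)"),
--     (0xFEFF, 0xFEFF, "BOM mid-file"),
--     (0xFFFD, 0xFFFD, "replacement character (unsafe decoding)"),
--     (0xE0100, 0xE01EF, "variation selector supplement (GlassWorm)"),
-- ]
--
--
-- def _is_dangerous(codepoint: int) -> tuple[bool, str]: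
--     """Check if a Unicode codepoint is dangerous.
--
--     Returns ``(is_dangerous, reason)``.
--     """
--     # Binary search: find the last interval whose start is <= codepoint.
--     lo, hi = 0, len(_INTERVALS)
--     while lo < hi:
--         mid = (lo + hi) // 2
--         if _INTERVALS[mid][0] <= codepoint:
--             lo = mid + 1
--         else:
--             hi = mid
--     if lo > 0:
--         _, end, reason = _INTERVALS[lo - 1]
--         if codepoint <= end:
--             return True, reason
--
--     # Cf = Format characters (invisible) — catch-all
--     if unicodedata.category(chr(codepoint)) == "Cf":
--         return True, "format character (Cf)"
--
--     return False, ""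
-- ===== Notes on version B (the rewrite author's own statement) =====
-- stated objective: alternative
-- what changed: Replaces the linear scan over six ranges followed by a dict lookup of three singles with a binary search over one merged sorted table of nine disjoint intervals (singles as one-point intervals); the Cf catch-all is unchanged.
import Mathlib
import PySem

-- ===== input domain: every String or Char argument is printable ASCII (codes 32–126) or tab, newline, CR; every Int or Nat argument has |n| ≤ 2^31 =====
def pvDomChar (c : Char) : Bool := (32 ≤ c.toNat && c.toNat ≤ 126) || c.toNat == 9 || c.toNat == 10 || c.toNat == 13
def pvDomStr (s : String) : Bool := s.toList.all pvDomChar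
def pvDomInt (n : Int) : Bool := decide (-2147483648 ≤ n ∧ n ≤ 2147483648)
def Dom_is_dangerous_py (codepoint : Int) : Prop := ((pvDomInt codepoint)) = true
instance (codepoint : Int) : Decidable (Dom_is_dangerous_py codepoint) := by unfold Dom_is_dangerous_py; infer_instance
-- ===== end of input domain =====

-- B replaces the linear range scan + singles dict with a binary search over one
-- merged sorted interval table (objective: alternative algorithm, same cost class).

-- Shared environment: `unicodedata.category(chr(cp)) == "Cf"` ported by hand as
-- membership in the 21 closed intervals of category Cf codepoints; exact for the
-- Unicode data of the CPython (3.11) that runs A and B, on the codepoints Pre_ admits.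
def pvCfIntervals : List (Int × Int) :=
  [(173, 173), (1536, 1541), (1564, 1564), (1757, 1757), (1807, 1807),
   (2192, 2193), (2274, 2274), (6158, 6158), (8203, 8207), (8234, 8238),
   (8288, 8292), (8294, 8303), (65279, 65279), (65529, 65531), (69821, 69821),
   (69837, 69837), (78896, 78904), (113824, 113827), (119155, 119162),
   (917505, 917505), (917536, 917631)]

def pvIsCf (cp : Int) : Bool :=
  pvCfIntervals.any (fun p => p.1 ≤ cp && cp ≤ p.2)

-- ===== PORT A =====
def pvDangerousRanges : List (Int × Int × String) :=
  [(0xFE00, 0xFE0F, "variation selector (GlassWorm)"),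
   (0xE0100, 0xE01EF, "variation selector supplement (GlassWorm)"),
   (0x202A, 0x202E, "bidi control (Trojan Source CVE-2021-42574)"),
   (0x2066, 0x2069, "bidi control (Trojan Source CVE-2021-42574)"),
   (0x200B, 0x200F, "zero-width/invisible"),
   (0x2060, 0x2064, "zero-width/invisible")]

def pvDangerousSingles : PySem.Dict Int String :=
  PySem.Dict.ofList [(0x180E, "Mongolian vowel separator (Cf)"),
   (0xFEFF, "BOM mid-file"),
   (0xFFFD, "replacement character (unsafe decoding)")]

-- the `for start, end, reason in _DANGEROUS_RANGES:` loop with its early return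
def pvRangeScan (cp : Int) : List (Int × Int × String) → Option String
  | [] => none
  | (s, e, r) :: rest => if s ≤ cp ∧ cp ≤ e then some r else pvRangeScan cp rest

def is_dangerous_py (codepoint : Int) : Bool × String :=
  match pvRangeScan codepoint pvDangerousRanges with
  | some reason => (true, reason)
  | none =>
    match PySem.Dict.get? pvDangerousSingles codepoint with
    | some reason => (true, reason)
    | none =>
      if pvIsCf codepoint then (true, "format character (Cf)")
      else (false, "")

-- ===== PORT B =====
def pvIntervals : List (Int × Int × String) :=
  [(0x180E, 0x180E, "Mongolian vowel separator (Cf)"),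
   (0x200B, 0x200F, "zero-width/invisible"),
   (0x202A, 0x202E, "bidi control (Trojan Source CVE-2021-42574)"),
   (0x2060, 0x2064, "zero-width/invisible"),
   (0x2066, 0x2069, "bidi control (Trojan Source CVE-2021-42574)"),
   (0xFE00, 0xFE0F, "variation selector (GlassWorm)"),
   (0xFEFF, 0xFEFF, "BOM mid-file"),
   (0xFFFD, 0xFFFD, "replacement character (unsafe decoding)"),
   (0xE0100, 0xE01EF, "variation selector supplement (GlassWorm)")]

-- the `while lo < hi` binary-search loop of Source B, returning the final `lo`
-- fuel = table length bounds the iteration count (hi - lo shrinks each step)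
def pvBsLoop (cp : Int) : Nat → Nat → Nat → Nat
  | 0, lo, _ => lo
  | fuel + 1, lo, hi =>
    if lo < hi then
      let mid := (lo + hi) / 2
      if (pvIntervals.getD mid (0, 0, "")).1 ≤ cp then pvBsLoop cp fuel (mid + 1) hi
      else pvBsLoop cp fuel lo mid
    else lo

def is_dangerous_py_alt (codepoint : Int) : Bool × String :=
  let lo := pvBsLoop codepoint pvIntervals.length 0 pvIntervals.length
  let hit : Option String :=
    if lo > 0 then
      let (_, e, r) := pvIntervals.getD (lo - 1) (0, 0, "")
      if codepoint ≤ e then some r else none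
    else none
  match hit with
  | some reason => (true, reason)
  | none =>
    if pvIsCf codepoint then (true, "format character (Cf)")
    else (false, "")

-- ===== PRECONDITION & SPEC =====
-- Pre_ excludes exactly the inputs where A raises: on a negative codepoint or one
-- beyond the maximum Unicode scalar value, `chr(codepoint)` raises in both A and B.
def Pre_is_dangerous_py (codepoint : Int) : Prop :=
  0 ≤ codepoint ∧ codepoint ≤ 0x10FFFF
instance (codepoint : Int) : Decidable (Pre_is_dangerous_py codepoint) := by
  unfold Pre_is_dangerous_py; infer_instance

def pvWitness_is_dangerous_py : Int := 8234

def Spec_is_dangerous_py (codepoint : Int) (out : Bool × String) : Prop := out = is_dangerous_py_alt codepoint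
instance (codepoint : Int) (out : Bool × String) : Decidable (Spec_is_dangerous_py codepoint out) := by unfold Spec_is_dangerous_py; infer_instance

-- ===== CLAIM (what is proved, stated in full; the proofs are below) =====
def Claim_equal_is_dangerous_py : Prop := ∀ (codepoint : Int), Dom_is_dangerous_py codepoint → Pre_is_dangerous_py codepoint → Spec_is_dangerous_py codepoint (is_dangerous_py codepoint)

-- ===== LEMMAS AND PROOFS =====

-- the singles dict lookup evaluated to its equality chain
theorem pvSingles_get (cp : Int) : PySem.Dict.get? pvDangerousSingles cp =
    (if cp = 65533 then some "replacement character (unsafe decoding)"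
     else if cp = 65279 then some "BOM mid-file"
     else if cp = 6158 then some "Mongolian vowel separator (Cf)" else none) := by
  simp only [pvDangerousSingles, PySem.Dict.ofList, PySem.Dict.update, List.foldl]
  simp [PySem.Dict.get?_insert, PySem.Dict.get?_empty]

-- the binary search evaluated to its decision tree over the nine interval starts
theorem pvBsLoop_char (cp : Int) : pvBsLoop cp 9 0 9 =
    (if 8294 ≤ cp then
      if 65533 ≤ cp then if 917760 ≤ cp then 9 else 8
      else if 65279 ≤ cp then 7 else if 65024 ≤ cp then 6 else 5
    else if 8234 ≤ cp then if 8288 ≤ cp then 4 else 3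
    else if 8203 ≤ cp then 2 else if 6158 ≤ cp then 1 else 0) := by
  simp [pvBsLoop, pvIntervals]

-- ===== VERDICT (by name: the statement is the Claim_ definition above) =====
set_option maxHeartbeats 12000000 in
theorem is_dangerous_py_spec : Claim_equal_is_dangerous_py := by
  intro cp _ _
  unfold Spec_is_dangerous_py is_dangerous_py is_dangerous_py_alt
  simp only [pvIntervals, List.length_cons, List.length_nil]
  rw [show (0 : Nat) + 1 + 1 + 1 + 1 + 1 + 1 + 1 + 1 + 1 = 9 from rfl, pvBsLoop_char]
  rw [pvSingles_get]
  simp only [pvRangeScan, pvDangerousRanges]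
  split_ifs <;> first | omega | rfl | (simp_all; omega) | simp_all
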